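-- pv_equiv track=rewrite | github.com/Efdix/ChatCellAnno | chatcellanno/genome_utils.py | format_mega_style
-- ===== SOURCE A (Python) =====
-- def format_mega_style(records, wrap=60):
--     """
--     Format sequences into MEGA-style alignment view.
--     If wrap is None or 0, it produces one long line per species.
--     """
--     if not records: return ""
--
--     ref_seq = records[0]['sequence']
--     output = []
--
--     # Determine the longest name for alignment
--     name_width = max(len(r['species']) for r in records) + 2
--
--     # If wrap is None, treat it as one giant block
--     effective_wrap = wrap if wrap and wrap > 0 else len(ref_seq)
--
--     # Break into chunks
--     for start in range(0, len(ref_seq), effective_wrap):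
--         end = min(start + effective_wrap, len(ref_seq))
--
--         # Ruler/Coord
--         if wrap:
--             output.append(f"{' ' * name_width} {start + 1}")
--
--         for i, rec in enumerate(records):
--             seq = rec['sequence']
--             current_chunk = seq[start:end]
--
--             # Display logic
--             display_chunk = ""
--             if i == 0:
--                 display_chunk = current_chunk
--             else:
--                 # Compare with reference
--                 ref_chunk = ref_seq[start:end]
--                 for j in range(len(current_chunk)):
--                     if j < len(ref_chunk) and ref_chunk[j] == current_chunk[j]:
--                         display_chunk += "."
--                     else:
--                         display_chunk += current_chunk[j]
--
--             output.append(f"{rec['species'].ljust(name_width)} {display_chunk}")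
--
--         if wrap:
--             output.append("") # Gap between blocks
--
--     return "\n".join(output)
-- ===== SOURCE B (Python) =====
-- def format_mega_style(records, wrap=60):
--     """MEGA-style alignment view: precompute one dotted display string per record,
--     then wrap all of them in a separate chunking pass."""
--     if not records:
--         return ""
--     ref = records[0]['sequence']
--     name_width = max(len(r['species']) for r in records) + 2
--     effective_wrap = wrap if wrap and wrap > 0 else len(ref)
--     displays = []
--     for i, r in enumerate(records):
--         seq = r['sequence']
--         if i == 0:
--             disp = seq
--         else:
--             disp = ''.join('.' if k < len(ref) and ref[k] == c else c
--                            for k, c in enumerate(seq))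
--         displays.append((r['species'].ljust(name_width), disp))
--     lines = []
--     for start in range(0, len(ref), effective_wrap):
--         end = min(start + effective_wrap, len(ref))
--         if wrap:
--             lines.append(f"{' ' * name_width} {start + 1}")
--         for name, disp in displays:
--             lines.append(f"{name} {disp[start:end]}")
--         if wrap:
--             lines.append("")
--     return "\n".join(lines)
-- ===== Notes on version B (the rewrite author's own statement) =====
-- stated objective: alternative
-- what changed: A interleaves chunking and dot-comparison, recomputing the dotted chunk character by character inside every wrap block; B first builds one complete dotted display string per record in a single pass and then a separate pure wrapping pass only slices and joins these precomputed strings.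
import Mathlib
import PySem

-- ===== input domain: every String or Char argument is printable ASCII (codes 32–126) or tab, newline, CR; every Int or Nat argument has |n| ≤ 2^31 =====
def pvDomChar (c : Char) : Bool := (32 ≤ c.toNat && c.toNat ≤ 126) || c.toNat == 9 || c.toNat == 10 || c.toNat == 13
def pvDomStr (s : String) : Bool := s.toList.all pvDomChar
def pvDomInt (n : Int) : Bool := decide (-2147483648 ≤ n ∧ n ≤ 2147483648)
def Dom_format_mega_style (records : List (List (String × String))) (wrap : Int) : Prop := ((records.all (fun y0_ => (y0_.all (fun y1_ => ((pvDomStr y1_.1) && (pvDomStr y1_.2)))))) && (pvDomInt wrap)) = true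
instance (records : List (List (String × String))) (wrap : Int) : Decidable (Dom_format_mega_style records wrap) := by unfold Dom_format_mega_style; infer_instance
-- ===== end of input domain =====

-- B splits A's single interleaved compare-and-chunk loop into a precompute-all-dotted-strings
-- pass followed by a pure wrapping pass (objective: alternative decomposition, same cost).

-- ===== PORT A =====
-- shared record accessors (rec['sequence'], rec['species'] as first-match dict lookup; total via default,
-- Pre_ guarantees the keys are present wherever Python reads them)
def pvSeq (r : List (String × String)) : List Char :=
  ((PySem.Dict.mk r).getD "sequence" "").toList

def pvName (r : List (String × String)) : List Char :=
  ((PySem.Dict.mk r).getD "species" "").toList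

-- s.ljust(w)
def pvLjust (cs : List Char) (w : Nat) : List Char :=
  cs ++ List.replicate (w - cs.length) ' '

-- max(len(r['species']) for r in records) + 2
def pvNameWidth (records : List (List (String × String))) : Nat :=
  ((records.map (fun r => (pvName r).length)).foldl max 0) + 2

-- f"{' ' * name_width} {start + 1}"
def pvRuler (nw : Nat) (start : Int) : List Char :=
  List.replicate nw ' ' ++ ' ' :: PySem.Int.toChars (start + 1)

def format_mega_style (records : List (List (String × String))) (wrap : Int) : String :=
  match records with
  | [] => ""
  | r0 :: _ =>
    let ref := pvSeq r0
    let nw := pvNameWidth records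
    -- wrap if wrap and wrap > 0 else len(ref_seq)
    let eff : Int := if 0 < wrap then wrap else (ref.length : Int)
    let output : List (List Char) :=
      (PySem.List.pyRange 0 (ref.length : Int) eff).foldl (fun out start =>
        let stop : Int := min (start + eff) (ref.length : Int)
        let out := if wrap ≠ 0 then out ++ [pvRuler nw start] else out
        let out := (PySem.List.enumerate records).foldl (fun out ir =>
          let seq := pvSeq ir.2
          let chunk := PySem.List.slice seq (some start) (some stop)
          let disp : List Char :=
            if ir.1 = 0 then chunk
            else
              let refChunk := PySem.List.slice ref (some start) (some stop)
              (PySem.List.pyRange 0 (chunk.length : Int) 1).foldl (fun d j =>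
                if j < (refChunk.length : Int) ∧
                    PySem.List.pyGetD refChunk j ' ' = PySem.List.pyGetD chunk j ' '
                then d ++ ['.']
                else d ++ [PySem.List.pyGetD chunk j ' ']) []
          out ++ [pvLjust (pvName ir.2) nw ++ ' ' :: disp]) out
        if wrap ≠ 0 then out ++ [[]] else out) []
    String.ofList (PySem.Chars.join ['\n'] output)

-- ===== PORT B =====
-- the dotted display string for a non-reference record, built once over the whole sequence
def pvDotted (ref seq : List Char) : List Char :=
  (PySem.List.enumerate seq).map (fun kc =>
    if kc.1 < (ref.length : Int) ∧ PySem.List.pyGetD ref kc.1 ' ' = kc.2 then '.' else kc.2)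

def format_mega_style_alt (records : List (List (String × String))) (wrap : Int) : String :=
  match records with
  | [] => ""
  | r0 :: _ =>
    let ref := pvSeq r0
    let nw := pvNameWidth records
    let eff : Int := if 0 < wrap then wrap else (ref.length : Int)
    -- pass 1: one (padded name, display string) pair per record
    let displays : List (List Char × List Char) :=
      (PySem.List.enumerate records).map (fun ir =>
        (pvLjust (pvName ir.2) nw,
         if ir.1 = 0 then pvSeq ir.2 else pvDotted ref (pvSeq ir.2)))
    -- pass 2: pure wrapping
    let lines : List (List Char) :=
      (PySem.List.pyRange 0 (ref.length : Int) eff).foldl (fun out start =>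
        let stop : Int := min (start + eff) (ref.length : Int)
        let out := if wrap ≠ 0 then out ++ [pvRuler nw start] else out
        let out := displays.foldl (fun out nd =>
          out ++ [nd.1 ++ ' ' :: PySem.List.slice nd.2 (some start) (some stop)]) out
        if wrap ≠ 0 then out ++ [[]] else out) []
    String.ofList (PySem.Chars.join ['\n'] lines)

-- ===== PRECONDITION & SPEC =====
-- Pre_ excludes exactly the inputs where Python A raises: a record missing the 'species' or
-- 'sequence' key (KeyError), and a nonempty records list whose reference sequence is empty
-- while wrap ≤ 0 (range step 0 → ValueError).
def Pre_format_mega_style (records : List (List (String × String))) (wrap : Int) : Prop :=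
  (∀ r ∈ records, ((PySem.Dict.mk r).get? "species").isSome = true ∧
      ((PySem.Dict.mk r).get? "sequence").isSome = true) ∧
  (records ≠ [] → 0 < wrap ∨ pvSeq (records.headD []) ≠ [])

instance (records : List (List (String × String))) (wrap : Int) : Decidable (Pre_format_mega_style records wrap) := by
  unfold Pre_format_mega_style; infer_instance

def pvWitness_format_mega_style : (List (List (String × String))) × Int :=
  ([[("species", "Human"), ("sequence", "ACGTAC")],
    [("species", "Mouse"), ("sequence", "ACTTAG")]], 4)

def Spec_format_mega_style (records : List (List (String × String))) (wrap : Int) (out : String) : Prop := out = format_mega_style_alt records wrap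
instance (records : List (List (String × String))) (wrap : Int) (out : String) : Decidable (Spec_format_mega_style records wrap out) := by unfold Spec_format_mega_style; infer_instance

-- ===== CLAIM (what is proved, stated in full; the proofs are below) =====
def Claim_equal_format_mega_style : Prop := ∀ (records : List (List (String × String))) (wrap : Int), Dom_format_mega_style records wrap → Pre_format_mega_style records wrap → Spec_format_mega_style records wrap (format_mega_style records wrap)

-- ===== LEMMAS AND PROOFS =====

-- A's per-chunk dot-compare loop computes exactly the slice of B's precomputed display string.
lemma dotted_chunk (ref seq : List Char) (start stop : Int)
    (h0 : 0 ≤ start) (hse : start ≤ stop) (hstop : stop ≤ (ref.length : Int)) :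
    (PySem.List.pyRange 0 ((PySem.List.slice seq (some start) (some stop)).length : Int) 1).foldl
      (fun d j =>
        if j < ((PySem.List.slice ref (some start) (some stop)).length : Int) ∧
            PySem.List.pyGetD (PySem.List.slice ref (some start) (some stop)) j ' '
              = PySem.List.pyGetD (PySem.List.slice seq (some start) (some stop)) j ' '
        then d ++ ['.']
        else d ++ [PySem.List.pyGetD (PySem.List.slice seq (some start) (some stop)) j ' ']) []
      = PySem.List.slice (pvDotted ref seq) (some start) (some stop) := by
  have he : (0:Int) ≤ stop := le_trans h0 hse
  rw [PySem.List.slice_toNat seq h0 he, PySem.List.slice_toNat ref h0 he,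
      PySem.List.slice_toNat (pvDotted ref seq) h0 he]
  set s := start.toNat with hs
  set e := stop.toNat with heN
  have hsle : s ≤ e := by omega
  have heref : e ≤ ref.length := by omega
  set chunk := List.take (e - s) (List.drop s seq) with hchunk
  set refChunk := List.take (e - s) (List.drop s ref) with hrefChunk
  have hlc : chunk.length = min (e - s) (seq.length - s) := by
    simp [hchunk]
  have hlr : refChunk.length = e - s := by
    simp [hrefChunk]; omega
  rw [PySem.List.pyRange_zero_nat chunk.length, List.foldl_map]
  have hbody : ∀ (d : List Char) (k : Nat), k ∈ List.range chunk.length →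
      (if ((k : Int)) < ((refChunk.length : Nat) : Int) ∧
          PySem.List.pyGetD refChunk (k : Int) ' ' = PySem.List.pyGetD chunk (k : Int) ' '
       then d ++ ['.'] else d ++ [PySem.List.pyGetD chunk (k : Int) ' ']) =
      d ++ [if PySem.List.pyGetD refChunk (k : Int) ' ' = PySem.List.pyGetD chunk (k : Int) ' '
            then '.' else PySem.List.pyGetD chunk (k : Int) ' '] := by
    intro d k hk
    have hk' : k < chunk.length := List.mem_range.mp hk
    have : ((k : Int)) < ((refChunk.length : Nat) : Int) := by
      rw [hlr]; exact_mod_cast (by omega : k < e - s)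
    simp only [this, true_and]
    split <;> simp [*]
  rw [PySem.List.foldl_congr_mem _ _ _ _ hbody,
      PySem.List.foldl_append_singleton_eq_map, List.nil_append]
  apply List.ext_getElem
  · simp [pvDotted, hlc]
  · intro t ht1 ht2
    have htc : t < chunk.length := by simpa using ht1
    have htseq : s + t < seq.length := by
      rw [hlc] at htc; omega
    have hte : t < e - s := by rw [hlc] at htc; omega
    have hget_chunk : PySem.List.pyGetD chunk (t : Int) ' ' = seq[s + t] := by
      rw [PySem.List.pyGetD_natCast, List.getD_eq_getElem?_getD]
      simp [hchunk, hte, List.getElem?_drop, htseq]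
    have hget_ref : PySem.List.pyGetD refChunk (t : Int) ' ' = ref[s + t] := by
      rw [PySem.List.pyGetD_natCast, List.getD_eq_getElem?_getD]
      have : s + t < ref.length := by omega
      simp [hrefChunk, hte, List.getElem?_drop, this]
    rw [List.getElem_map, List.getElem_range, hget_chunk, hget_ref]
    have hdr : (List.take (e - s) (List.drop s (pvDotted ref seq)))[t] =
        (pvDotted ref seq)[s + t]'(by simp [pvDotted]; omega) := by
      rw [List.getElem_take, List.getElem_drop]
    rw [hdr]
    simp only [pvDotted, List.getElem_map, PySem.List.getElem_enumerate, zero_add]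
    have hlt : ((s + t : Nat) : Int) < (ref.length : Int) := by exact_mod_cast (by omega : s + t < ref.length)
    rw [PySem.List.pyGetD_natCast]
    have h1 : ((s:Int) + (t:Int)) < (ref.length : Int) := by push_cast at hlt ⊢; omega
    have h2 : ref[s + t]?.getD ' ' = ref[s + t]'(by omega) := by
      rw [List.getElem?_eq_getElem (by omega)]; rfl
    simp [h1, h2]

-- ===== VERDICT (by name: the statement is the Claim_ definition above) =====
theorem format_mega_style_spec : Claim_equal_format_mega_style := by
  intro records wrap _hdom hpre
  unfold Spec_format_mega_style
  obtain ⟨hkeys, hnz⟩ := hpre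
  cases records with
  | nil => rfl
  | cons r0 rs =>
    simp only [format_mega_style, format_mega_style_alt]
    have heff : (0:Int) < (if 0 < wrap then wrap else ((pvSeq r0).length : Int)) := by
      split
      · assumption
      · have : pvSeq r0 ≠ [] := by
          rcases hnz (by simp) with h | h
          · omega
          · simpa using h
        have : 0 < (pvSeq r0).length := List.length_pos_iff.mpr this
        exact_mod_cast this
    congr 1
    congr 1
    apply PySem.List.foldl_congr_mem
    intro acc start hstart
    obtain ⟨hs0, hslt, -⟩ := (PySem.List.mem_pyRange_iff_of_pos heff start).mp hstart
    rw [List.foldl_map]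
    have hinner : ∀ (out : List (List Char)),
        (PySem.List.enumerate (r0 :: rs)).foldl (fun out ir =>
          out ++ [pvLjust (pvName ir.2) (pvNameWidth (r0 :: rs)) ++ ' ' ::
            (if ir.1 = 0 then
              PySem.List.slice (pvSeq ir.2) (some start)
                (some (min (start + (if 0 < wrap then wrap else ((pvSeq r0).length : Int))) ((pvSeq r0).length : Int)))
             else
              (PySem.List.pyRange 0 (((PySem.List.slice (pvSeq ir.2) (some start)
                (some (min (start + (if 0 < wrap then wrap else ((pvSeq r0).length : Int))) ((pvSeq r0).length : Int)))).length : Nat) : Int) 1).foldl (fun d j =>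
                if j < (((PySem.List.slice (pvSeq r0) (some start)
                    (some (min (start + (if 0 < wrap then wrap else ((pvSeq r0).length : Int))) ((pvSeq r0).length : Int)))).length : Nat) : Int) ∧
                    PySem.List.pyGetD (PySem.List.slice (pvSeq r0) (some start)
                      (some (min (start + (if 0 < wrap then wrap else ((pvSeq r0).length : Int))) ((pvSeq r0).length : Int)))) j ' '
                      = PySem.List.pyGetD (PySem.List.slice (pvSeq ir.2) (some start)
                      (some (min (start + (if 0 < wrap then wrap else ((pvSeq r0).length : Int))) ((pvSeq r0).length : Int)))) j ' '
                then d ++ ['.']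
                else d ++ [PySem.List.pyGetD (PySem.List.slice (pvSeq ir.2) (some start)
                  (some (min (start + (if 0 < wrap then wrap else ((pvSeq r0).length : Int))) ((pvSeq r0).length : Int)))) j ' ']) [])]) out
        = (PySem.List.enumerate (r0 :: rs)).foldl (fun out ir =>
          out ++ [(pvLjust (pvName ir.2) (pvNameWidth (r0 :: rs)),
              if ir.1 = 0 then pvSeq ir.2 else pvDotted (pvSeq r0) (pvSeq ir.2)).1 ++ ' ' ::
            PySem.List.slice (pvLjust (pvName ir.2) (pvNameWidth (r0 :: rs)),
              if ir.1 = 0 then pvSeq ir.2 else pvDotted (pvSeq r0) (pvSeq ir.2)).2 (some start)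
              (some (min (start + (if 0 < wrap then wrap else ((pvSeq r0).length : Int))) ((pvSeq r0).length : Int)))]) out := by
      intro out
      apply PySem.List.foldl_congr_mem
      intro out2 ir _
      dsimp only
      by_cases h0 : ir.1 = 0
      · simp [h0]
      · simp only [h0, if_false]
        exact congrArg
          (fun z => out2 ++ [pvLjust (pvName ir.2) (pvNameWidth (r0 :: rs)) ++ ' ' :: z])
          (dotted_chunk (pvSeq r0) (pvSeq ir.2) start _ hs0
            (le_min (by omega) (le_of_lt hslt)) (min_le_right _ _))
    exact congrArg (fun f => if wrap ≠ 0 then f ++ [[]] else f)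
      (by exact hinner (if wrap ≠ 0 then acc ++ [pvRuler (pvNameWidth (r0 :: rs)) start] else acc))
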